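-- pv_equiv track=rewrite | github.com/popgengui/agestrucnb | agestrucne/pgopsimupop.py | __get_dict_chromosome_number_by_loci_number_evenly_distributed
-- ===== SOURCE A (Python) =====
-- from builtins import range
--
-- def __get_dict_chromosome_number_by_loci_number_evenly_distributed (
-- 																		i_number_of_loci,
-- 																		i_number_of_chromosomes ):
--
-- 	'''
-- 	2018_04_18. We're adding chromosome/loci
-- 	associations in order to leverage LDNe2's
-- 	feature that computes Ne using chromosome/loci
-- 	information.  Note that the easy, default way
-- 	to get simupop to evenly  assign, say, 30 loci
-- 	to 5 chromosomes, "loci=[10,10,10],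
-- 	chromtypes=[Autosome]*5", means that if our user
-- 	is using both q Msats and r snps, and since we always
-- 	assign the first q loci to be msats and the last r
-- 	to be snps, the default chrom assignments will tend to
-- 	bunch the msats together on the same (few) first
-- 	chromosomes and the snps on the last.  We thus
-- 	will distribute them using the addLoci and addChrom
-- 	methods of the pop struct (see __createSinglePop).
-- 	In order to hold these assignments
-- 	steady among replicates, we, rather than using any
-- 	random assignment, we assign N loci 0,1,2...N-1 to
-- 	M chromosomes 0,1,2...M-1, in order, i=1,2,3...N,
-- 	assigning loci i to chromsome i mod M, which puts
-- 	an additional loci on each of the first T chromosomes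
-- 	where T = N mod M.
--
-- 	Note: if the number of chromosomes exceeds the number
-- 	of loci, we trim the number of chromosomes to equal
-- 	the number of loci.
--
-- 	2018_05_22.  Testing using Genepop's linkage diseq
-- 	test shows that despite assigning loci using the
-- 	alternating-chromosome method described above, alleles
-- 	are treated as physically linked according
-- 	to the scheme, for N loci and M chromosomes, that the first
-- 	N/M loci are assigned to a single chromosome, the second
-- 	N/M loci assigned to another, etc.  Therefor we change the
-- 	loci assignment scheme so that the program will output
-- 	a chromsome/loci file that agrees with the way alleles
-- 	are linked in the program.
-- 	'''
--
-- 	di_chromosome_number_by_loci_number={}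
--
-- 	if i_number_of_loci < i_number_of_chromosomes:
-- 		i_number_of_chromosomes=i_number_of_loci
-- 	#end if more chromosomes thatn loci, get rid of excess
-- 	#chromosomes
--
-- 	i_partition_size=int( i_number_of_loci / i_number_of_chromosomes )
--
-- 	i_remainder=i_number_of_loci % i_number_of_chromosomes
--
-- 	i_loci_count=0
--
-- 	for i_chr in range( i_number_of_chromosomes ):
-- 		for i_part_idx in range( i_partition_size ):
-- 			di_chromosome_number_by_loci_number[ i_loci_count ]=i_chr
-- 			i_loci_count += 1
-- 		#end for each partition index
--
-- 		#If we have remainder, add one loci to the current chromosome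
-- 		if i_remainder > 0:
-- 			di_chromosome_number_by_loci_number[ i_loci_count ]=i_chr
-- 			i_loci_count += 1
-- 			i_remainder-=1
-- 		#end if remainder, add loci
-- 	#end for each chrom
--
-- 	return di_chromosome_number_by_loci_number
-- ===== SOURCE B (Python) =====
-- def __get_dict_chromosome_number_by_loci_number_evenly_distributed(
--         i_number_of_loci,
--         i_number_of_chromosomes):
--     i_n = i_number_of_loci
--     i_m = i_number_of_chromosomes
--     if i_n < i_m:
--         i_m = i_n
--     i_partition_size = int(i_n / i_m)
--     i_remainder = i_n % i_m
--     if i_m <= 0: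
--         return {}
--     i_boundary = i_remainder * (i_partition_size + 1)
--     return {j: (j // (i_partition_size + 1) if j < i_boundary
--                 else i_remainder + (j - i_boundary) // i_partition_size)
--             for j in range(i_n)}
-- ===== Notes on version B (the rewrite author's own statement) =====
-- stated objective: alternative
-- what changed: Replaces A's nested chromosome/partition loops with per-chromosome counter-and-remainder state by a single flat pass over the loci that computes each locus's chromosome with a closed-form index formula from the partition size and remainder.
-- outside the precondition, e.g. on __get_dict_chromosome_number_by_loci_number_evenly_distributed(0, 5): A raises ZeroDivisionError, B raises ZeroDivisionError
import Mathlib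
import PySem

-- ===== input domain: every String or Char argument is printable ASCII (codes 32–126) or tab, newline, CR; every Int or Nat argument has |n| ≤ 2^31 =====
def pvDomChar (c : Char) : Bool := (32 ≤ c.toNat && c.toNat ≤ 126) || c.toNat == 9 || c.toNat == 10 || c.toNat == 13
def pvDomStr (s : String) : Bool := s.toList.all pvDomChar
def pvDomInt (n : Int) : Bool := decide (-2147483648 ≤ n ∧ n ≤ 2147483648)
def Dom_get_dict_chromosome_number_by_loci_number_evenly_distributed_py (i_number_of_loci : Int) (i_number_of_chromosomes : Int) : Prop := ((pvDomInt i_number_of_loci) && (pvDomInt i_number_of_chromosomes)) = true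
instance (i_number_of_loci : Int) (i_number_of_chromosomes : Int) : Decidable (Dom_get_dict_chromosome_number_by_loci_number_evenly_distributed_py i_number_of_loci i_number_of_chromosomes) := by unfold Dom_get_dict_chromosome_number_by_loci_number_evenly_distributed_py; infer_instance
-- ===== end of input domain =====

-- B replaces A's nested chromosome/partition loops by one flat pass over the loci
-- with a closed-form index→chromosome formula (objective: alternative, same O(N) cost).

-- ===== PORT A =====
-- one chromosome iteration of A's outer loop: the inner partition loop, then the remainder branch
def pvAStep (i_partition_size : Int)
    (s : PySem.Dict Int Int × Int × Int) (i_chr : Int) :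
    PySem.Dict Int Int × Int × Int :=
  let s := (PySem.List.pyRange 0 i_partition_size 1).foldl
    (fun (s : PySem.Dict Int Int × Int × Int) (_ : Int) =>
      (s.1.insert s.2.1 i_chr, s.2.1 + 1, s.2.2)) s
  if s.2.2 > 0 then (s.1.insert s.2.1 i_chr, s.2.1 + 1, s.2.2 - 1) else s

def get_dict_chromosome_number_by_loci_number_evenly_distributed_py (i_number_of_loci : Int) (i_number_of_chromosomes : Int) : List (Int × Int) :=
  let i_number_of_chromosomes := if i_number_of_loci < i_number_of_chromosomes then i_number_of_loci else i_number_of_chromosomes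
  -- int(N / M): truncating division, exact for |arguments| ≤ 2^31 (inside Dom_)
  let i_partition_size := PySem.Int.truncdiv i_number_of_loci i_number_of_chromosomes
  let i_remainder := PySem.Int.mod i_number_of_loci i_number_of_chromosomes
  -- state: (dict so far, i_loci_count, i_remainder)
  let s := (PySem.List.pyRange 0 i_number_of_chromosomes 1).foldl
    (pvAStep i_partition_size) (PySem.Dict.empty, 0, i_remainder)
  s.1.items

-- ===== PORT B =====
def get_dict_chromosome_number_by_loci_number_evenly_distributed_py_alt (i_number_of_loci : Int) (i_number_of_chromosomes : Int) : List (Int × Int) :=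
  let i_m := if i_number_of_loci < i_number_of_chromosomes then i_number_of_loci else i_number_of_chromosomes
  -- int(N / M): truncating division, exact for |arguments| ≤ 2^31 (inside Dom_)
  let i_partition_size := PySem.Int.truncdiv i_number_of_loci i_m
  let i_remainder := PySem.Int.mod i_number_of_loci i_m
  if i_m ≤ 0 then []
  else
    let i_boundary := i_remainder * (i_partition_size + 1)
    (PySem.List.pyRange 0 i_number_of_loci 1).map (fun j =>
      (j, if j < i_boundary then PySem.Int.floordiv j (i_partition_size + 1)
          else i_remainder + PySem.Int.floordiv (j - i_boundary) i_partition_size))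

-- ===== PRECONDITION & SPEC =====
-- Pre_ excludes exactly the inputs where A raises ZeroDivisionError: the clamped
-- chromosome count min(N, M) is 0 (i.e. N = 0 ≤ M, or M = 0 ≤ N).
def Pre_get_dict_chromosome_number_by_loci_number_evenly_distributed_py (i_number_of_loci : Int) (i_number_of_chromosomes : Int) : Prop :=
  (if i_number_of_loci < i_number_of_chromosomes then i_number_of_loci else i_number_of_chromosomes) ≠ 0
instance (i_number_of_loci : Int) (i_number_of_chromosomes : Int) : Decidable (Pre_get_dict_chromosome_number_by_loci_number_evenly_distributed_py i_number_of_loci i_number_of_chromosomes) := by unfold Pre_get_dict_chromosome_number_by_loci_number_evenly_distributed_py; infer_instance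

def pvWitness_get_dict_chromosome_number_by_loci_number_evenly_distributed_py : Int × Int := (10, 3)

def Spec_get_dict_chromosome_number_by_loci_number_evenly_distributed_py (i_number_of_loci : Int) (i_number_of_chromosomes : Int) (out : List (Int × Int)) : Prop := out = get_dict_chromosome_number_by_loci_number_evenly_distributed_py_alt i_number_of_loci i_number_of_chromosomes
instance (i_number_of_loci : Int) (i_number_of_chromosomes : Int) (out : List (Int × Int)) : Decidable (Spec_get_dict_chromosome_number_by_loci_number_evenly_distributed_py i_number_of_loci i_number_of_chromosomes out) := by unfold Spec_get_dict_chromosome_number_by_loci_number_evenly_distributed_py; infer_instance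

-- ===== CLAIM (what is proved, stated in full; the proofs are below) =====
def Claim_equal_get_dict_chromosome_number_by_loci_number_evenly_distributed_py : Prop := ∀ (i_number_of_loci : Int) (i_number_of_chromosomes : Int), Dom_get_dict_chromosome_number_by_loci_number_evenly_distributed_py i_number_of_loci i_number_of_chromosomes → Pre_get_dict_chromosome_number_by_loci_number_evenly_distributed_py i_number_of_loci i_number_of_chromosomes → Spec_get_dict_chromosome_number_by_loci_number_evenly_distributed_py i_number_of_loci i_number_of_chromosomes (get_dict_chromosome_number_by_loci_number_evenly_distributed_py i_number_of_loci i_number_of_chromosomes)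

-- ===== LEMMAS AND PROOFS =====

-- B's per-locus chromosome formula (proof-side name for the body of B's map)
def pvChr (p r j : Int) : Int :=
  if j < r * (p + 1) then PySem.Int.floordiv j (p + 1)
  else r + PySem.Int.floordiv (j - r * (p + 1)) p

-- loci index at which chromosome c starts
def pvStart (p r c : Int) : Int := c * p + min c r

-- A's inner partition loop, restated as an insert-fold over the key range it writes
lemma pvInnerFold (c : Int) (l : List Int) : ∀ (d : PySem.Dict Int Int) (k rem : Int),
    l.foldl (fun (s : PySem.Dict Int Int × Int × Int) (_ : Int) =>
        (s.1.insert s.2.1 c, s.2.1 + 1, s.2.2)) (d, k, rem)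
    = ((PySem.List.pyRange k (k + l.length) 1).foldl (fun dd j => dd.insert j c) d,
       k + l.length, rem) := by
  induction l with
  | nil =>
    intro d k rem
    simp only [List.length_nil, Nat.cast_zero, add_zero, List.foldl_nil]
    rw [PySem.List.pyRange_one_eq_nil (le_refl k)]
    simp
  | cons x t ih =>
    intro d k rem
    have hcons : PySem.List.pyRange k (k + ((t.length + 1 : Nat) : Int)) 1
        = k :: PySem.List.pyRange (k + 1) (k + ((t.length + 1 : Nat) : Int)) 1 := by
      apply PySem.List.pyRange_one_cons
      push_cast; omega
    simp only [List.foldl_cons, List.length_cons]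
    rw [ih, hcons]
    simp only [List.foldl_cons]
    have he : k + 1 + (t.length : Int) = k + ((t.length + 1 : Nat) : Int) := by push_cast; ring
    rw [he]

lemma pvChr_left {p r c a : Int} (hp : 1 ≤ p) (hcr : c + 1 ≤ r)
    (h1 : c * (p + 1) ≤ a) (h2 : a < (c + 1) * (p + 1)) : pvChr p r a = c := by
  have hb : a < r * (p + 1) := lt_of_lt_of_le h2 (by nlinarith)
  unfold pvChr
  rw [if_pos hb, PySem.Int.floordiv_eq_iff_of_pos (by omega)]
  exact ⟨h1, h2⟩

lemma pvChr_right {p r c a : Int} (hp : 1 ≤ p) (hrc : r ≤ c)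
    (h1 : c * p + r ≤ a) (h2 : a < (c + 1) * p + r) : pvChr p r a = c := by
  have hb : ¬ a < r * (p + 1) := by nlinarith
  unfold pvChr
  rw [if_neg hb]
  have : PySem.Int.floordiv (a - r * (p + 1)) p = c - r := by
    rw [PySem.Int.floordiv_eq_iff_of_pos (by omega)]
    constructor <;> nlinarith
  rw [this]; ring

-- a key larger than every key of the dict is absent
lemma pvContainsFalse (d : PySem.Dict Int Int) (a : Int)
    (h : ∀ q ∈ d.items, q.1 ≠ a) : d.contains a = false := by
  rw [PySem.Dict.contains_eq_decide_mem_keys]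
  simp only [PySem.Dict.keys, List.mem_map, decide_eq_false_iff_not]
  rintro ⟨q, hq, rfl⟩
  exact h q hq rfl

-- inserting a run of fresh keys appends their pairs to the items
lemma pvInsertRange (c k m : Int) (d : PySem.Dict Int Int)
    (h : ∀ q ∈ d.items, q.1 < k) :
    ((PySem.List.pyRange k m 1).foldl (fun dd j => dd.insert j c) d).items
      = d.items ++ (PySem.List.pyRange k m 1).map (fun a => (a, c)) := by
  rw [PySem.Dict.items_foldl_insert_fresh]
  · intro a ha
    rw [PySem.List.mem_pyRange_one] at ha
    exact pvContainsFalse d a (fun q hq => by have := h q hq; omega)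
  · simpa using PySem.List.nodup_pyRange_one k m

-- evaluating one pvAStep on a state with known components, remainder exhausted
lemma pvAStep_zero (p c k rem : Int) (d : PySem.Dict Int Int)
    (hp : 0 ≤ p) (hrem : rem ≤ 0) :
    pvAStep p (d, k, rem) c
      = (((PySem.List.pyRange k (k + p) 1).foldl (fun dd j => dd.insert j c) d),
         k + p, rem) := by
  unfold pvAStep
  rw [pvInnerFold c (PySem.List.pyRange 0 p 1) d k rem]
  have hl : ((PySem.List.pyRange 0 p 1).length : Int) = p := by
    rw [PySem.List.length_pyRange_one]; omega
  rw [hl, if_neg (show ¬ ((_, k + p, rem) : PySem.Dict Int Int × Int × Int).2.2 > 0 by show ¬ rem > 0; omega)]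

-- evaluating one pvAStep, remainder still positive: one extra locus
lemma pvAStep_pos (p c k rem : Int) (d : PySem.Dict Int Int)
    (hp : 0 ≤ p) (hrem : 0 < rem) :
    pvAStep p (d, k, rem) c
      = (((PySem.List.pyRange k (k + p + 1) 1).foldl (fun dd j => dd.insert j c) d),
         k + p + 1, rem - 1) := by
  unfold pvAStep
  rw [pvInnerFold c (PySem.List.pyRange 0 p 1) d k rem]
  have hl : ((PySem.List.pyRange 0 p 1).length : Int) = p := by
    rw [PySem.List.length_pyRange_one]; omega
  rw [hl, if_pos (show ((_, k + p, rem) : PySem.Dict Int Int × Int × Int).2.2 > 0 by show rem > 0; omega)]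
  have hsplit : PySem.List.pyRange k (k + p + 1) 1
      = PySem.List.pyRange k (k + p) 1 ++ [k + p] :=
    PySem.List.pyRange_one_succ_right (by omega)
  rw [hsplit, List.foldl_append]
  simp

-- the loop invariant of A's outer chromosome loop
lemma pvLoopInv (p r : Int) (hp : 1 ≤ p) (hr : 0 ≤ r) : ∀ c : Nat,
    ((PySem.List.pyRange 0 (c : Int) 1).foldl (pvAStep p) (PySem.Dict.empty, 0, r)).1.items
      = (PySem.List.pyRange 0 (pvStart p r c) 1).map (fun j => (j, pvChr p r j))
    ∧ ((PySem.List.pyRange 0 (c : Int) 1).foldl (pvAStep p) (PySem.Dict.empty, 0, r)).2.1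
      = pvStart p r c
    ∧ ((PySem.List.pyRange 0 (c : Int) 1).foldl (pvAStep p) (PySem.Dict.empty, 0, r)).2.2
      = r - min (c : Int) r := by
  intro c
  induction c with
  | zero =>
    have h0 : pvStart p r 0 = 0 := by
      unfold pvStart; rw [zero_mul, min_eq_left hr]; ring
    simp only [Nat.cast_zero, PySem.List.pyRange_one_eq_nil (le_refl (0:Int)),
      List.foldl_nil, h0]
    refine ⟨?_, by trivial, by show r = r - min 0 r; omega⟩
    simp [PySem.Dict.empty]
  | succ c ih =>
    obtain ⟨hd, hk, hrem⟩ := ih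
    have hc0 : (0:Int) ≤ (c:Int) := Int.natCast_nonneg c
    have hsplit : PySem.List.pyRange 0 ((c+1 : Nat) : Int) 1
        = PySem.List.pyRange 0 (c : Int) 1 ++ [(c : Int)] := by
      push_cast
      exact PySem.List.pyRange_one_succ_right hc0
    rw [hsplit, List.foldl_append]
    set s := (PySem.List.pyRange 0 (c:Int) 1).foldl (pvAStep p) (PySem.Dict.empty, 0, r) with hs
    have hse : s = (s.1, pvStart p r c, r - min (c:Int) r) := by
      rw [← hk, ← hrem]
    have hkpos : 0 ≤ pvStart p r c := by
      unfold pvStart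
      have := mul_nonneg hc0 (by omega : (0:Int) ≤ p)
      omega
    have hbound : ∀ q ∈ s.1.items, q.1 < pvStart p r c := by
      intro q hq
      rw [hd] at hq
      obtain ⟨j, hj, hqe⟩ := List.mem_map.mp hq
      rw [PySem.List.mem_pyRange_one] at hj
      have : q.1 = j := by rw [← hqe]
      omega
    simp only [List.foldl_cons, List.foldl_nil]
    by_cases hcr : (c:Int) < r
    · have hk1 : pvStart p r c = (c:Int) * (p + 1) := by
        unfold pvStart; rw [min_eq_left (le_of_lt hcr)]; ring
      have hk2 : pvStart p r (((c+1 : Nat)) : Int) = pvStart p r c + p + 1 := by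
        unfold pvStart
        push_cast
        rw [min_eq_left (by omega), min_eq_left (by omega)]
        ring
      rw [hse, pvAStep_pos p (c:Int) (pvStart p r c) (r - min (c:Int) r) s.1
        (by omega) (by omega)]
      refine ⟨?_, by rw [hk2], by push_cast; omega⟩
      rw [pvInsertRange (c:Int) (pvStart p r c) (pvStart p r c + p + 1) s.1 hbound, hd, hk2]
      rw [PySem.List.pyRange_one_append 0 (pvStart p r c) (pvStart p r c + p + 1)
        hkpos (by omega), List.map_append]
      congr 1
      apply (List.map_congr_left _).symm
      intro a ha
      rw [PySem.List.mem_pyRange_one] at ha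
      have : pvChr p r a = (c:Int) := by
        apply pvChr_left hp (by omega)
        · omega
        · nlinarith [ha.2]
      rw [this]
    · have hk1 : pvStart p r c = (c:Int) * p + r := by
        unfold pvStart; rw [min_eq_right (by omega)]
      have hk2 : pvStart p r (((c+1 : Nat)) : Int) = pvStart p r c + p := by
        unfold pvStart
        push_cast
        rw [min_eq_right (by omega), min_eq_right (by omega)]
        ring
      rw [hse, pvAStep_zero p (c:Int) (pvStart p r c) (r - min (c:Int) r) s.1
        (by omega) (by omega)]
      refine ⟨?_, by rw [hk2], by push_cast; omega⟩
      rw [pvInsertRange (c:Int) (pvStart p r c) (pvStart p r c + p) s.1 hbound, hd, hk2]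
      rw [PySem.List.pyRange_one_append 0 (pvStart p r c) (pvStart p r c + p)
        hkpos (by omega), List.map_append]
      congr 1
      apply (List.map_congr_left _).symm
      intro a ha
      rw [PySem.List.mem_pyRange_one] at ha
      have : pvChr p r a = (c:Int) := by
        apply pvChr_right hp (by omega)
        · omega
        · nlinarith [ha.2]
      rw [this]

-- int(N / M) is plain floor division on the admitted domain (0 ≤ N, 0 < M)
lemma pvTruncdivPos (a b : Int) (ha : 0 ≤ a) :
    PySem.Int.truncdiv a b = a / b := by
  simp only [PySem.Int.truncdiv]
  exact Int.tdiv_eq_ediv_of_nonneg ha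

theorem get_dict_chromosome_number_by_loci_number_evenly_distributed_py_spec : Claim_equal_get_dict_chromosome_number_by_loci_number_evenly_distributed_py := by
  intro N M hdom hpre
  unfold Pre_get_dict_chromosome_number_by_loci_number_evenly_distributed_py at hpre
  unfold Spec_get_dict_chromosome_number_by_loci_number_evenly_distributed_py
  simp only [get_dict_chromosome_number_by_loci_number_evenly_distributed_py,
    get_dict_chromosome_number_by_loci_number_evenly_distributed_py_alt]
  set K := if N < M then N else M with hK
  by_cases hM0 : K ≤ 0
  · have hneg : K < 0 := lt_of_le_of_ne hM0 hpre
    rw [if_pos hM0, PySem.List.pyRange_one_eq_nil (le_of_lt hneg)]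
    rfl
  · rw [not_le] at hM0
    rw [if_neg (by omega)]
    have hKN : K ≤ N := by rw [hK]; split <;> omega
    have hN0 : 0 ≤ N := by omega
    rw [pvTruncdivPos N K hN0, PySem.Int.mod_eq_emod_of_pos hM0]
    set p := N / K with hpdef
    set r := N % K with hrdef
    have hp1 : 1 ≤ p := by
      rw [hpdef]
      rw [Int.le_ediv_iff_mul_le hM0]
      omega
    have hr0 : 0 ≤ r := Int.emod_nonneg N (ne_of_gt hM0)
    have hrK : r < K := Int.emod_lt_of_pos N hM0
    have hNe : K * p + r = N := Int.mul_ediv_add_emod N K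
    obtain ⟨hd, -, -⟩ := pvLoopInv p r hp1 hr0 K.toNat
    rw [Int.toNat_of_nonneg (by omega : (0:Int) ≤ K)] at hd
    rw [hd]
    have hstart : pvStart p r K = N := by
      unfold pvStart
      rw [min_eq_right (le_of_lt hrK)]
      linarith
    rw [hstart]
    simp only [pvChr]
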